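-- pv_equiv track=rewrite | github.com/algorithm-yeoun/Algorithm | 프로그래머스/0/120864. 숨어있는 숫자의 덧셈 （2）/숨어있는 숫자의 덧셈 （2）.py | solution
-- ===== SOURCE A (Python) =====
-- def solution(my_string):
--     num_str=''
--     for i in my_string:
--         if i.isalpha():
--             num_str+=' '
--         else:
--             num_str+=i
--
--     return sum(int(i) for i in num_str.split())
-- ===== SOURCE B (Python) =====
-- def solution(my_string):
--     total = 0
--     buf = ''
--     for ch in my_string:
--         if ch.isalpha() or ch.isspace():
--             if buf:
--                 total += int(buf)
--                 buf = ''
--         else: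
--             buf += ch
--     if buf:
--         total += int(buf)
--     return total
-- ===== Notes on version B (the rewrite author's own statement) =====
-- stated objective: faster
-- what changed: B is a one-pass inline tokenizer with a running total and a token buffer, eliminating A's intermediate rebuilt string, the split() pass and the generator-sum pass.
-- outside the precondition, e.g. on solution('1.2'): A raises ValueError, B raises ValueError
import Mathlib
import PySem

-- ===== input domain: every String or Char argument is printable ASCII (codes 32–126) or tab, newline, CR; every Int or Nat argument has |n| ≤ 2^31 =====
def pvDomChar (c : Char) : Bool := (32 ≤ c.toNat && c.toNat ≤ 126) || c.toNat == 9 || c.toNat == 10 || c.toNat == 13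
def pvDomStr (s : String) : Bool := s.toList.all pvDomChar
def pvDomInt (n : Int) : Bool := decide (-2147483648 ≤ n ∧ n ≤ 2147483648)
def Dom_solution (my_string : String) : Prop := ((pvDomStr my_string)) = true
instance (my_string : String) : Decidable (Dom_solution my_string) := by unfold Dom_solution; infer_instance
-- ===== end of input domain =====

-- B replaces A's rebuild-string + split + sum (three passes) with one inline tokenizer pass
-- keeping a token buffer and a running total.

-- ===== PORT A =====
def solution (my_string : String) : Int :=
  let num_str := my_string.toList.foldl
    (fun acc i => if PySem.Chars.isalpha i then acc ++ [' '] else acc ++ [i]) []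
  ((PySem.Chars.split₀ num_str).map (fun t => (PySem.Int.ofChars? t).getD 0)).sum

-- ===== PORT B =====
def altStep (st : Int × List Char) (ch : Char) : Int × List Char :=
  if PySem.Chars.isalpha ch || PySem.Chars.isspace ch then
    if st.2 ≠ [] then (st.1 + (PySem.Int.ofChars? st.2).getD 0, []) else st
  else (st.1, st.2 ++ [ch])

def solution_alt (my_string : String) : Int :=
  let st := my_string.toList.foldl altStep (0, [])
  if st.2 ≠ [] then st.1 + (PySem.Int.ofChars? st.2).getD 0 else st.1

-- ===== PRECONDITION & SPEC =====
-- the tokens (maximal runs of non-alpha non-whitespace characters) that int() is applied to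
def pvTokens (cs : List Char) : List (List Char) :=
  PySem.Chars.split₀ (cs.map (fun c => if PySem.Chars.isalpha c then ' ' else c))

-- Pre_ excludes inputs where some token is not a valid int literal: Python A raises ValueError there.
def Pre_solution (my_string : String) : Prop :=
  ∀ t ∈ pvTokens my_string.toList, (PySem.Int.ofChars? t).isSome = true

instance (my_string : String) : Decidable (Pre_solution my_string) := by
  unfold Pre_solution; infer_instance

def pvWitness_solution : String := "a1b2 -3c"

def Spec_solution (my_string : String) (out : Int) : Prop := out = solution_alt my_string
instance (my_string : String) (out : Int) : Decidable (Spec_solution my_string out) := by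
  unfold Spec_solution; infer_instance

-- ===== CLAIM (what is proved, stated in full; the proofs are below) =====
def Claim_equal_solution : Prop := ∀ (my_string : String), Dom_solution my_string → Pre_solution my_string → Spec_solution my_string (solution my_string)

-- ===== LEMMAS AND PROOFS =====

def tokVal (t : List Char) : Int := (PySem.Int.ofChars? t).getD 0

def sumTok (l : List (List Char)) : Int := (l.map tokVal).sum

lemma go_acc (cs cur : List Char) (acc : List (List Char)) :
    PySem.Chars.split₀.go cs cur acc = acc.reverse ++ PySem.Chars.split₀.go cs cur [] := by
  induction cs generalizing cur acc with
  | nil => simp [PySem.Chars.split₀.go]; split <;> simp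
  | cons c rest ih =>
    simp only [PySem.Chars.split₀.go]
    split
    · split
      · exact ih [] acc
      · rw [ih [] (cur.reverse :: acc), ih [] [cur.reverse]]; simp
    · exact ih _ _

lemma buildA (cs : List Char) (acc : List Char) :
    cs.foldl (fun acc i => if PySem.Chars.isalpha i then acc ++ [' '] else acc ++ [i]) acc
      = acc ++ cs.map (fun c => if PySem.Chars.isalpha c then ' ' else c) := by
  induction cs generalizing acc with
  | nil => simp
  | cons c rest ih => simp only [List.foldl, List.map]; split <;> simp [ih]

lemma isspace_mapped (c : Char) :
    PySem.Chars.isspace (if PySem.Chars.isalpha c then ' ' else c)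
      = (PySem.Chars.isalpha c || PySem.Chars.isspace c) := by
  by_cases h : PySem.Chars.isalpha c = true <;> simp [h]
  decide

lemma main_lemma (cs : List Char) (total : Int) (cur : List Char) :
    (let st := cs.foldl altStep (total, cur.reverse)
     if st.2 ≠ [] then st.1 + (PySem.Int.ofChars? st.2).getD 0 else st.1)
      = total + sumTok (PySem.Chars.split₀.go
          (cs.map (fun c => if PySem.Chars.isalpha c then ' ' else c)) cur []) := by
  induction cs generalizing total cur with
  | nil =>
    simp only [List.foldl, List.map, PySem.Chars.split₀.go]
    by_cases h : cur = []
    · simp [h, sumTok]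
    · simp [h, List.isEmpty_iff, sumTok, tokVal]
  | cons c rest ih =>
    simp only [List.foldl, List.map, PySem.Chars.split₀.go, isspace_mapped]
    by_cases hd : (PySem.Chars.isalpha c || PySem.Chars.isspace c) = true
    · simp only [hd, if_pos, altStep]
      by_cases hc : cur = []
      · subst hc
        simp only [List.reverse_nil, ne_eq, not_true_eq_false, if_false,
          List.isEmpty_nil, if_true]
        exact ih total []
      · have hcr : cur.reverse ≠ [] := by simp [hc]
        simp only [hcr, if_pos, List.isEmpty_iff, hc, if_neg, ne_eq, not_false_eq_true]
        rw [go_acc _ [] [cur.reverse]]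
        have := ih (total + (PySem.Int.ofChars? cur.reverse).getD 0) []
        simp only [List.reverse_nil] at this
        rw [this]
        simp [sumTok, tokVal]
        ring
    · have hal : PySem.Chars.isalpha c = false := by
        cases h' : PySem.Chars.isalpha c <;> simp [h'] at hd ⊢
      simp only [if_neg, Bool.not_eq_true, altStep, hal, Bool.false_or]
      have hsp : PySem.Chars.isspace c = false := by
        cases h' : PySem.Chars.isspace c <;> simp [hal, h'] at hd ⊢
      simp only [hsp, Bool.false_eq_true, if_neg, not_false_eq_true]
      have : cur.reverse ++ [c] = (c :: cur).reverse := by simp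
      rw [this]
      exact ih total (c :: cur)

-- ===== VERDICT (by name: the statement is the Claim_ definition above) =====
theorem solution_spec : Claim_equal_solution := by
  intro s _ _
  show solution s = solution_alt s
  unfold solution solution_alt
  rw [buildA]
  simpa [PySem.Chars.split₀, sumTok, tokVal] using (main_lemma s.toList 0 []).symm
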